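-- pv_equiv track=rewrite | github.com/981377660LMT/algorithm-study | 22_专题/计算偏移量(同余分组)/6329. 使子数组元素和相等-循环数组.py | makeSubKSumEqual
-- ===== SOURCE A (Python) =====
-- from collections import defaultdict
-- from math import gcd
-- from typing import List
--
-- def makeSubKSumEqual(arr: List[int], k: int) -> int:
--     n = len(arr)
--     gcd_ = gcd(n, k)
--     mp = defaultdict(list)
--     for i in range(n):
--         mp[i % gcd_].append(arr[i])
--     res = 0
--     for g in mp.values():
--         g.sort()
--         mid = g[len(g) // 2]
--         res += sum(abs(x - mid) for x in g)
--     return res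
-- ===== SOURCE B (Python) =====
-- from math import gcd
--
--
-- def _kth_smallest(xs, i):
--     # iterative quickselect, pivot = middle element
--     while True:
--         p = xs[len(xs) // 2]
--         lt = [x for x in xs if x < p]
--         if i < len(lt):
--             xs = lt
--             continue
--         eq = xs.count(p)
--         if i < len(lt) + eq:
--             return p
--         i -= len(lt) + eq
--         xs = [x for x in xs if x > p]
--
--
-- def makeSubKSumEqual(arr, k):
--     if not arr:
--         return 0
--     n = len(arr)
--     g = gcd(n, k)
--     buckets = [[] for _ in range(g)]
--     for i, x in enumerate(arr):
--         buckets[i % g].append(x)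
--     res = 0
--     for grp in buckets:
--         med = _kth_smallest(grp, len(grp) // 2)
--         res += sum(abs(x - med) for x in grp)
--     return res
-- ===== Notes on version B (the rewrite author's own statement) =====
-- stated objective: alternative
-- what changed: B groups elements into a preallocated list of g buckets in one pass and finds each group's upper median with an iterative quickselect (middle-element pivot) instead of A's defaultdict grouping followed by a full sort of every group.
import Mathlib
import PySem

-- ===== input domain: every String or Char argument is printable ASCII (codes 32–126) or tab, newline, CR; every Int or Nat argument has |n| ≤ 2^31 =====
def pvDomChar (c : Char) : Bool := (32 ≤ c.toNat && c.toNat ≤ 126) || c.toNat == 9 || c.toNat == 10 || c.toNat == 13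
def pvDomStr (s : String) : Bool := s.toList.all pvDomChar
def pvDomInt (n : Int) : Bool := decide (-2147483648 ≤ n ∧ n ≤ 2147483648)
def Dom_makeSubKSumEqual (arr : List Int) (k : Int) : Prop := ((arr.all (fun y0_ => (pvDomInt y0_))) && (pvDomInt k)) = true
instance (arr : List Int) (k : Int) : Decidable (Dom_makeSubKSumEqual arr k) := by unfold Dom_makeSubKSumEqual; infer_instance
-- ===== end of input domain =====

-- B replaces A's per-group full sort (used only to read off the upper median) by a one-pass
-- bucket grouping plus an iterative quickselect of the median per group: objective 'alternative'.

-- ===== PORT A =====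
def makeSubKSumEqual (arr : List Int) (k : Int) : Int :=
  let n := arr.length
  let gcd_ : Int := (Int.gcd (n : Int) k : Nat)
  let mp := (List.range n).foldl
    (fun d i => d.modify (PySem.Int.mod (i : Int) gcd_) []
      (fun l => l ++ [PySem.List.pyGetD arr (i : Int) 0]))
    (PySem.Dict.empty : PySem.Dict Int (List Int))
  (PySem.Dict.values mp).foldl
    (fun res gr =>
      let s := PySem.List.sorted gr (fun x => x) false
      -- g[len(g)//2]: groups are never empty, so Python never raises here; `.getD 0` is the unreachable IndexError branch
      let mid := (PySem.List.pyGet? s (PySem.Int.floordiv (s.length : Int) 2)).getD 0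
      res + (s.map (fun x => |x - mid|)).sum) 0

-- ===== PORT B =====
-- termination helper for the quickselect loop, cited by `decreasing_by`
theorem pvFilter_lt_of_mem {l : List Int} {p : Int} (q : Int → Bool) (hp : p ∈ l)
    (hq : q p = false) : (l.filter q).length < l.length := by
  apply List.length_filter_lt_length_iff_exists .. |>.mpr
  exact ⟨p, hp, by simp [hq]⟩

-- iterative quickselect (pivot = middle element); the Python `while True` loop becomes recursion
def pvKth : List Int → Nat → Int
  | [], _ => 0   -- unreachable: every group is nonempty
  | x :: t, i =>
    let p := (x :: t).getD ((x :: t).length / 2) 0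
    let lt := (x :: t).filter (fun y => y < p)
    if i < lt.length then pvKth lt i
    else
      let eq := (x :: t).count p
      if i < lt.length + eq then p
      else pvKth ((x :: t).filter (fun y => p < y)) (i - (lt.length + eq))
termination_by xs _ => xs.length
decreasing_by
  all_goals
  · have hp : (x :: t).getD ((x :: t).length / 2) 0 ∈ x :: t := by
      rw [List.getD_eq_getElem _ _ (Nat.div_lt_self (by simp) one_lt_two)]
      exact List.getElem_mem _
    exact pvFilter_lt_of_mem (p := (x :: t).getD ((x :: t).length / 2) 0) _ hp (by simp)

def makeSubKSumEqual_alt (arr : List Int) (k : Int) : Int :=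
  match arr with
  | [] => 0
  | _ :: _ =>
    let n := arr.length
    let g : Nat := Int.gcd (n : Int) k
    -- buckets[i % g].append(x)  (i % g ≥ 0 since g > 0 here, so `.toNat` is exact)
    let buckets := (PySem.List.enumerate arr 0).foldl
      (fun bs q => bs.set (PySem.Int.mod q.1 (g : Int)).toNat
        (bs.getD (PySem.Int.mod q.1 (g : Int)).toNat [] ++ [q.2]))
      (List.replicate g ([] : List Int))
    buckets.foldl
      (fun res grp =>
        let med := pvKth grp (grp.length / 2)
        res + (grp.map (fun x => |x - med|)).sum) 0

-- ===== PRECONDITION & SPEC =====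
def Spec_makeSubKSumEqual (arr : List Int) (k : Int) (out : Int) : Prop := out = makeSubKSumEqual_alt arr k
instance (arr : List Int) (k : Int) (out : Int) : Decidable (Spec_makeSubKSumEqual arr k out) := by unfold Spec_makeSubKSumEqual; infer_instance

-- ===== CLAIM (what is proved, stated in full; the proofs are below) =====
def Claim_equal_makeSubKSumEqual : Prop := ∀ (arr : List Int) (k : Int), Dom_makeSubKSumEqual arr k → Spec_makeSubKSumEqual arr k (makeSubKSumEqual arr k)

-- ===== LEMMAS AND PROOFS =====

-- the r-th residue group of arr mod g, in index order
def pvGrp (arr : List Int) (g r : Nat) : List Int :=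
  ((List.range arr.length).filter (fun i => i % g == r)).map (fun i => arr.getD i 0)

-- A's per-group cost: sort, take the upper median, sum distances
def pvCostA (gr : List Int) : Int :=
  let s := PySem.List.sorted gr (fun x => x) false
  let mid := (PySem.List.pyGet? s (PySem.Int.floordiv (s.length : Int) 2)).getD 0
  (s.map (fun x => |x - mid|)).sum

-- B's per-group cost: quickselect the upper median, sum distances
def pvCostB (gr : List Int) : Int :=
  let med := pvKth gr (gr.length / 2)
  (gr.map (fun x => |x - med|)).sum

theorem pvEnum_eq (xs : List Int) (s : Int) :
    PySem.List.enumerate xs s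
      = (List.range xs.length).map (fun i : Nat => (s + (i : Int), xs.getD i 0)) := by
  induction xs generalizing s with
  | nil => simp [PySem.List.enumerate_nil]
  | cons x t ih =>
    rw [PySem.List.enumerate_cons, ih]
    simp [List.range_succ_eq_map, List.map_map, Function.comp_def]
    omega

theorem pvGrp_ne_nil (arr : List Int) (g r : Nat) (hr : r < g) (hle : g ≤ arr.length) :
    pvGrp arr g r ≠ [] := by
  have : r ∈ (List.range arr.length).filter (fun i => i % g == r) := by
    rw [List.mem_filter]
    exact ⟨List.mem_range.mpr (by omega), by simp [Nat.mod_eq_of_lt hr]⟩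
  intro hnil
  rw [pvGrp, List.map_eq_nil_iff] at hnil
  simp [hnil] at this

theorem pvResidues (n g : Nat) (hg : 0 < g) (hle : g ≤ n) :
    PySem.Set.ofList ((List.range n).map (fun i : Nat => PySem.Int.mod (i : Int) (g : Int)))
      = (List.range g).map (fun r : Nat => (r : Int)) := by
  have hsplit : List.range n = List.range g ++ (List.range (n - g)).map (g + ·) := by
    have : n = g + (n - g) := by omega
    rw [this, List.range_add]; simp
  rw [hsplit, List.map_append, PySem.Set.ofList_append]
  have hfirst : (List.range g).map (fun i : Nat => PySem.Int.mod (i : Int) (g : Int))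
      = (List.range g).map (fun r : Nat => (r : Int)) := by
    apply List.map_congr_left
    intro i hi
    rw [PySem.Int.mod_natCast, Nat.mod_eq_of_lt (List.mem_range.mp hi)]
  rw [hfirst]
  rw [PySem.Set.ofList_eq_self_of_nodup (xs := (List.range g).map (fun r : Nat => (r : Int)))
    (List.Nodup.map (fun a b h => by exact_mod_cast h) List.nodup_range)]
  rw [PySem.Set.update_eq_append_filter]
  rw [List.filter_eq_nil_iff.mpr, List.append_nil]
  intro y hy
  rw [PySem.Set.mem_ofList] at hy
  simp only [List.map_map, List.mem_map, Function.comp_def] at hy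
  obtain ⟨j, _, rfl⟩ := hy
  rw [PySem.Int.mod_natCast]
  have : ((g + j) % g : Nat) < g := Nat.mod_lt _ hg
  simp only [Bool.not_eq_true', Bool.not_eq_false]
  have hmem : (((g + j) % g : Nat) : Int) ∈ (List.range g).map (fun r : Nat => (r : Int)) :=
    List.mem_map.mpr ⟨_, List.mem_range.mpr this, rfl⟩
  simpa [PySem.Set.contains] using hmem

theorem pvSorted_split (l : List Int) (p : Int) :
    PySem.List.sorted l (fun x => x) false
      = PySem.List.sorted (l.filter (fun y => y < p)) (fun x => x) false
        ++ l.filter (fun y => y == p)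
        ++ PySem.List.sorted (l.filter (fun y => p < y)) (fun x => x) false := by
  have slt := PySem.List.sorted_perm (l.filter (fun y => decide (y < p))) (fun x => x) false
  have sgt := PySem.List.sorted_perm (l.filter (fun y => decide (p < y))) (fun x => x) false
  have sl := PySem.List.sorted_perm l (fun x => x) false
  have h1 : List.Perm (l.filter (fun y => decide (y < p)) ++ l.filter (fun y => !decide (y < p))) l :=
    List.filter_append_perm _ l
  have h2 : List.Perm ((l.filter (fun y => !decide (y < p))).filter (fun y => y == p)
      ++ (l.filter (fun y => !decide (y < p))).filter (fun y => !(y == p)))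
      (l.filter (fun y => !decide (y < p))) := List.filter_append_perm _ _
  have e1 : (l.filter (fun y => !decide (y < p))).filter (fun y => y == p)
      = l.filter (fun y => y == p) := by
    rw [List.filter_filter]
    apply List.filter_congr
    intro x _
    by_cases h : x = p <;> simp [h]
  have e2 : (l.filter (fun y => !decide (y < p))).filter (fun y => !(y == p))
      = l.filter (fun y => decide (p < y)) := by
    rw [List.filter_filter]
    apply List.filter_congr
    intro x _
    rcases lt_trichotomy x p with h|h|h <;> simp [h] <;> omega
  rw [e1, e2] at h2
  have hperm : List.Perm l
      (PySem.List.sorted (l.filter (fun y => decide (y < p))) (fun x => x) false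
        ++ l.filter (fun y => y == p)
        ++ PySem.List.sorted (l.filter (fun y => decide (p < y))) (fun x => x) false) := by
    refine (h1.symm.trans ((List.Perm.append_left _ h2.symm).trans ?_))
    rw [← List.append_assoc]
    exact List.Perm.append (List.Perm.append slt.symm (List.Perm.refl _)) sgt.symm
  refine PySem.List.eq_of_perm_of_pairwise_le (sl.trans hperm) ?_ ?_
  · simpa using PySem.List.sorted_pairwise l (fun x => x)
  · simp only [List.pairwise_append]
    refine ⟨⟨by simpa using PySem.List.sorted_pairwise _ (fun x => x),
      List.pairwise_of_forall_mem_list ?_, ?_⟩,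
      by simpa using PySem.List.sorted_pairwise _ (fun x => x), ?_⟩
    · intro a ha b hb
      rw [List.mem_filter] at ha hb
      have : a = p := by simpa using ha.2
      have : b = p := by simpa using hb.2
      omega
    · intro a ha b hb
      have ha' : a < p := by
        have := slt.mem_iff.mp ha
        rw [List.mem_filter] at this
        simpa using this.2
      rw [List.mem_filter] at hb
      have : b = p := by simpa using hb.2
      omega
    · intro a ha b hb
      have hb' : p < b := by
        have := sgt.mem_iff.mp hb
        rw [List.mem_filter] at this
        simpa using this.2
      rcases List.mem_append.mp ha with ha | ha
      · have : a < p := by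
          have := slt.mem_iff.mp ha
          rw [List.mem_filter] at this
          simpa using this.2
        omega
      · rw [List.mem_filter] at ha
        have : a = p := by simpa using ha.2
        omega

theorem pvKth_sorted_aux (N : Nat) : ∀ (l : List Int), l.length ≤ N → ∀ i, i < l.length →
    pvKth l i = (PySem.List.sorted l (fun x => x) false).getD i 0 := by
  induction N with
  | zero => intro l hl i hi; omega
  | succ N ih =>
    rintro (_ | ⟨x, t⟩) hl i hi
    · simp at hi
    set l := x :: t with hldef
    set p := l.getD (l.length / 2) 0 with hp
    set ltl := l.filter (fun y => decide (y < p)) with hlt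
    set eqn := l.count p with heq
    set gtl := l.filter (fun y => decide (p < y)) with hgt
    have hpmem : p ∈ l := by
      rw [hp, List.getD_eq_getElem _ _ (Nat.div_lt_self (by simp [hldef]) one_lt_two)]
      exact List.getElem_mem _
    have hltlen : ltl.length < l.length :=
      pvFilter_lt_of_mem (p := p) _ hpmem (by simp)
    have hgtlen : gtl.length < l.length :=
      pvFilter_lt_of_mem (p := p) _ hpmem (by simp)
    have hsplit := pvSorted_split l p
    rw [← hlt, ← hgt] at hsplit
    have hslt := (PySem.List.sorted_perm ltl (fun x => x) false).length_eq
    have hsgt := (PySem.List.sorted_perm gtl (fun x => x) false).length_eq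
    have heqlen : (l.filter (fun y => y == p)).length = eqn := by
      rw [heq, List.count_eq_length_filter]
    have hlen : l.length = ltl.length + eqn + gtl.length := by
      have h1 := (PySem.List.sorted_perm l (fun x => x) false).length_eq
      rw [hsplit] at h1
      simp only [List.length_append] at h1
      omega
    rw [show pvKth l i =
        (if i < ltl.length then pvKth ltl i
         else if i < ltl.length + eqn then p
         else pvKth gtl (i - (ltl.length + eqn))) from by
      rw [hldef, pvKth]]
    by_cases h1 : i < ltl.length
    · rw [if_pos h1, hsplit, List.getD_append _ _ _ _ (by rw [List.length_append]; omega),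
        List.getD_append _ _ _ _ (by omega)]
      exact ih ltl (by omega) i (by omega)
    · rw [if_neg h1]
      by_cases h2 : i < ltl.length + eqn
      · rw [if_pos h2, hsplit,
          List.getD_append _ _ _ _ (by rw [List.length_append]; omega),
          List.getD_append_right _ _ _ _ (by omega), hslt]
        have hj : i - ltl.length < (l.filter (fun y => y == p)).length := by omega
        rw [List.getD_eq_getElem _ _ hj]
        have hmem := List.getElem_mem hj
        rw [List.mem_filter] at hmem
        have := hmem.2
        simp at this
        omega
      · rw [if_neg h2, hsplit,
          List.getD_append_right _ _ _ _ (by rw [List.length_append]; omega)]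
        have := ih gtl (by omega) (i - (ltl.length + eqn)) (by omega)
        rw [this]
        congr 1
        rw [List.length_append]
        omega

theorem pvKth_sorted (l : List Int) (i : Nat) (h : i < l.length) :
    pvKth l i = (PySem.List.sorted l (fun x => x) false).getD i 0 :=
  pvKth_sorted_aux l.length l le_rfl i h

theorem pvCost_eq (G : List Int) (hG : G ≠ []) : pvCostA G = pvCostB G := by
  have hpos : 0 < G.length := List.length_pos_iff.mpr hG
  have hlen : (PySem.List.sorted G (fun x => x) false).length = G.length :=
    (PySem.List.sorted_perm G (fun x => x) false).length_eq
  have hdiv : G.length / 2 < (PySem.List.sorted G (fun x => x) false).length := by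
    rw [hlen]; exact Nat.div_lt_self hpos one_lt_two
  have hmid : (PySem.List.pyGet? (PySem.List.sorted G (fun x => x) false)
      (PySem.Int.floordiv ((PySem.List.sorted G (fun x => x) false).length : Int) 2)).getD 0
      = pvKth G (G.length / 2) := by
    have hidx : PySem.Int.floordiv ((PySem.List.sorted G (fun x => x) false).length : Int) 2
        = ((G.length / 2 : Nat) : Int) := by
      rw [hlen]; exact_mod_cast PySem.Int.floordiv_natCast G.length 2
    rw [hidx, PySem.List.pyGet?_of_nonneg _ (by positivity)]
    rw [pvKth_sorted G (G.length / 2) (Nat.div_lt_self hpos one_lt_two)]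
    simp only [Int.toNat_natCast]
    rw [List.getElem?_eq_getElem hdiv]
    rw [List.getD_eq_getElem _ _ hdiv]
    rfl
  rw [pvCostA, pvCostB]
  simp only [hmid]
  exact List.Perm.sum_eq (List.Perm.map _ (PySem.List.sorted_perm G (fun x => x) false))

-- bucket-loop invariant for B
theorem pvBuckets (keyf : Nat → Nat) (valf : Nat → Int) :
    ∀ (l : List Nat) (bs : List (List Int)),
    (∀ i ∈ l, keyf i < bs.length) →
    ((l.foldl (fun bs i => bs.set (keyf i) (bs.getD (keyf i) [] ++ [valf i])) bs).length = bs.length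
     ∧ ∀ r, r < bs.length →
        (l.foldl (fun bs i => bs.set (keyf i) (bs.getD (keyf i) [] ++ [valf i])) bs).getD r []
          = bs.getD r [] ++ (l.filter (fun i => keyf i == r)).map valf) := by
  intro l
  induction l with
  | nil => intro bs _; exact ⟨rfl, fun r _ => by simp⟩
  | cons a l ih =>
    intro bs hk
    simp only [List.foldl_cons]
    have hlen' : (bs.set (keyf a) (bs.getD (keyf a) [] ++ [valf a])).length = bs.length :=
      List.length_set
    obtain ⟨hL, hG⟩ := ih (bs.set (keyf a) (bs.getD (keyf a) [] ++ [valf a]))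
      (by intro i hi; rw [hlen']; exact hk i (List.mem_cons_of_mem _ hi))
    refine ⟨by rw [hL, hlen'], ?_⟩
    intro r hr
    rw [hG r (by omega), List.filter_cons]
    by_cases hkey : keyf a = r
    · rw [if_pos (by simp [hkey]), hkey]
      have : (bs.set r (bs.getD r [] ++ [valf a])).getD r [] = bs.getD r [] ++ [valf a] := by
        simp [List.getD, hkey ▸ hk a List.mem_cons_self]
      rw [this, List.map_cons, List.append_assoc, List.singleton_append]
    · rw [if_neg (by simp [hkey])]
      have : (bs.set (keyf a) (bs.getD (keyf a) [] ++ [valf a])).getD r [] = bs.getD r [] := by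
        simp [List.getD, hkey]
      rw [this]

theorem pvA_eq (arr : List Int) (k : Int) (h : arr ≠ []) :
    makeSubKSumEqual arr k
      = ((List.range (Int.gcd (arr.length : Int) k)).map (pvGrp arr (Int.gcd (arr.length : Int) k))).foldl
          (fun res gr => res + pvCostA gr) 0 := by
  have hn : 0 < arr.length := List.length_pos_iff.mpr h
  set n := arr.length with hndef
  set g : Nat := Int.gcd (n : Int) k with hgdef
  have hgpos : 0 < g := Int.gcd_pos_of_ne_zero_left k (by exact_mod_cast hn.ne')
  have hgle : g ≤ n := Nat.le_of_dvd hn (by exact_mod_cast Int.gcd_dvd_left (n : Int) k)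
  rw [makeSubKSumEqual]
  simp only
  set mp := (List.range n).foldl
    (fun d i => d.modify (PySem.Int.mod (i : Int) ((g : Nat) : Int)) []
      (fun l => l ++ [PySem.List.pyGetD arr (i : Int) 0]))
    (PySem.Dict.empty : PySem.Dict Int (List Int)) with hmp
  have hkeys : mp.keys = (List.range g).map (fun r : Nat => (r : Int)) := by
    rw [hmp, PySem.Dict.keys_foldl_modify_key (List.range n)
      (fun i : Nat => PySem.Int.mod (i : Int) ((g : Nat) : Int)) []
      (fun _ i => fun l => l ++ [PySem.List.pyGetD arr (i : Int) 0]) _]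
    rw [PySem.Dict.keys_empty, PySem.Set.update_nil_left]
    exact pvResidues n g hgpos hgle
  have hnodup : mp.keys.Nodup := by
    rw [hkeys]
    exact List.Nodup.map (fun a b h => by exact_mod_cast h) List.nodup_range
  have hgetD : ∀ r : Nat, mp.getD (r : Int) [] = pvGrp arr g r := by
    intro r
    have hfold : mp = ((List.range n).map
        (fun i : Nat => ((PySem.Int.mod (i : Int) ((g : Nat) : Int)), PySem.List.pyGetD arr (i : Int) 0))).foldl
        (fun d p => d.modify p.1 [] (fun l => l ++ [p.2])) (PySem.Dict.empty : PySem.Dict Int (List Int)) := by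
      rw [List.foldl_map]
    rw [hfold, PySem.Dict.getD_foldl_modify_append, PySem.Dict.getD_empty, List.nil_append,
      List.filter_map, List.map_map]
    have hfil : (List.range n).filter
        ((fun p : Int × Int => p.1 == (r : Int)) ∘
          (fun i : Nat => ((PySem.Int.mod (i : Int) ((g : Nat) : Int)), PySem.List.pyGetD arr (i : Int) 0)))
        = (List.range n).filter (fun i => i % g == r) := by
      apply List.filter_congr
      intro i _
      simp [Function.comp, PySem.Int.mod_natCast]
      omega
    rw [hfil, pvGrp]
    apply List.map_congr_left
    intro i _
    simp [Function.comp, PySem.List.pyGetD_natCast]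
  rw [PySem.Dict.values_eq_map_keys mp hnodup [], hkeys, List.map_map]
  have hmapeq : (List.range g).map ((fun c => mp.getD c []) ∘ (fun r : Nat => (r : Int)))
      = (List.range g).map (pvGrp arr g) := by
    apply List.map_congr_left
    intro r _
    exact hgetD r
  rw [hmapeq]
  rfl

theorem pvB_eq (arr : List Int) (k : Int) (h : arr ≠ []) :
    makeSubKSumEqual_alt arr k
      = ((List.range (Int.gcd (arr.length : Int) k)).map (pvGrp arr (Int.gcd (arr.length : Int) k))).foldl
          (fun res gr => res + pvCostB gr) 0 := by
  rcases arr with _ | ⟨x, t⟩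
  · exact absurd rfl h
  set arr := x :: t with harr
  have hn : 0 < arr.length := by simp [harr]
  set n := arr.length with hndef
  set g : Nat := Int.gcd (n : Int) k with hgdef
  have hgpos : 0 < g := Int.gcd_pos_of_ne_zero_left k (by exact_mod_cast hn.ne')
  rw [show makeSubKSumEqual_alt arr k = (((PySem.List.enumerate arr 0).foldl
      (fun bs q => bs.set (PySem.Int.mod q.1 ((g : Nat) : Int)).toNat
        (bs.getD (PySem.Int.mod q.1 ((g : Nat) : Int)).toNat [] ++ [q.2]))
      (List.replicate g ([] : List Int))).foldl
      (fun res grp =>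
        let med := pvKth grp (grp.length / 2)
        res + (grp.map (fun x => |x - med|)).sum) 0) from rfl]
  rw [pvEnum_eq arr 0]
  simp only [zero_add]
  rw [List.foldl_map]
  have hbody : (List.range n).foldl
      (fun bs (i : Nat) => bs.set (PySem.Int.mod (i : Int) ((g : Nat) : Int)).toNat
        (bs.getD (PySem.Int.mod (i : Int) ((g : Nat) : Int)).toNat [] ++ [arr.getD i 0]))
      (List.replicate g ([] : List Int))
      = (List.range n).foldl
      (fun bs (i : Nat) => bs.set (i % g) (bs.getD (i % g) [] ++ [arr.getD i 0]))
      (List.replicate g ([] : List Int)) := by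
    apply PySem.List.foldl_congr_mem
    intro acc i _
    rw [PySem.Int.mod_natCast, Int.toNat_natCast]
  rw [hbody]
  obtain ⟨hL, hG⟩ := pvBuckets (fun i => i % g) (fun i => arr.getD i 0) (List.range n)
    (List.replicate g ([] : List Int))
    (by intro i _; rw [List.length_replicate]; exact Nat.mod_lt _ hgpos)
  have hb : (List.range n).foldl
      (fun bs (i : Nat) => bs.set (i % g) (bs.getD (i % g) [] ++ [arr.getD i 0]))
      (List.replicate g ([] : List Int))
      = (List.range g).map (pvGrp arr g) := by
    apply List.ext_getElem
    · rw [hL, List.length_replicate, List.length_map, List.length_range]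
    · intro idx h1 h2
      have hidx : idx < g := by
        rw [List.length_map, List.length_range] at h2; exact h2
      rw [← List.getD_eq_getElem _ ([] : List Int) h1,
        hG idx (by rw [List.length_replicate]; exact hidx),
        List.getD_replicate _ hidx, List.nil_append]
      rw [List.getElem_map, List.getElem_range]
      rfl
  rw [hb]
  rfl

-- ===== VERDICT (by name: the statement is the Claim_ definition above) =====
theorem makeSubKSumEqual_spec : Claim_equal_makeSubKSumEqual := by
  intro arr k _
  unfold Spec_makeSubKSumEqual
  rcases hne : arr with _ | ⟨a, t⟩
  · rfl
  rw [← hne]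
  have harr : arr ≠ [] := by simp [hne]
  have hn : 0 < arr.length := List.length_pos_iff.mpr harr
  set g : Nat := Int.gcd (arr.length : Int) k with hg
  have hgle : g ≤ arr.length := by
    refine Nat.le_of_dvd hn ?_
    have := Int.gcd_dvd_left (arr.length : Int) k
    exact_mod_cast this
  rw [pvA_eq arr k harr, pvB_eq arr k harr]
  rw [List.foldl_map, List.foldl_map]
  apply PySem.List.foldl_congr_mem
  intro acc r hrmem
  have hr : r < g := List.mem_range.mp hrmem
  rw [pvCost_eq _ (pvGrp_ne_nil arr g r hr hgle)]
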